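-- pv_equiv track=rewrite | github.com/BryanSaJi/email-validator-api | main.py | is_valid_tld
-- ===== SOURCE A (Python) =====
-- VALID_TLDS = {".com", ".net", ".org", ".edu", ".gov", ".co", ".io", ".dev", ".info", ".biz", ".mx", ".es", ".app", ".xyz"}
--
-- def is_valid_tld(domain: str) -> bool:
--     """Ensures the domain ends with a known TLD and has a name preceding it."""
--     sorted_tlds = sorted(list(VALID_TLDS), key=len, reverse=True)
--
--     for tld in sorted_tlds:
--         if domain.endswith(tld):
--             # Check if the TLD is not the entire domain (i.e., ensure something precedes it)
--             tld_start_index = len(domain) - len(tld)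
--             if tld_start_index > 0:
--                 return True
--     return False
-- ===== SOURCE B (Python) =====
-- VALID_TLDS = {".com", ".net", ".org", ".edu", ".gov", ".co", ".io", ".dev", ".info", ".biz", ".mx", ".es", ".app", ".xyz"}
--
-- def is_valid_tld(domain: str) -> bool:
--     """Ensures the domain ends with a known TLD and has a name preceding it."""
--     i = domain.rfind('.')
--     return i > 0 and domain[i:] in VALID_TLDS
-- ===== Notes on version B (the rewrite author's own statement) =====
-- stated objective: idiomatic
-- what changed: Instead of scanning all 14 TLDs longest-first with endswith, B finds the last dot once with rfind and does a single set-membership test on the suffix from that dot; requiring the dot index to be positive reproduces A's check that a name precedes the TLD.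
import Mathlib
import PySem

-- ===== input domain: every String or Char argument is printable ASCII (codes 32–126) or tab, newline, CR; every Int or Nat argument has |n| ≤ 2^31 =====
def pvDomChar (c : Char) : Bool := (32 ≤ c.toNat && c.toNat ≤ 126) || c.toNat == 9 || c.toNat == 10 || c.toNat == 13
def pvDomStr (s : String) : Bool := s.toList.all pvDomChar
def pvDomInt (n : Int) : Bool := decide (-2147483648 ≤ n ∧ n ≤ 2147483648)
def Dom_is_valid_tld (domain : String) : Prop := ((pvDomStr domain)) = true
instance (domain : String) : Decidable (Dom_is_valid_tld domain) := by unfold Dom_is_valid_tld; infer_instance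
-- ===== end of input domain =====

-- B replaces the longest-first endswith scan over all 14 TLDs by one rfind('.') and a single
-- set-membership test on the suffix from the last dot (idiomatic; return value only).

-- ===== PORT A =====
-- module-level constant VALID_TLDS (a Python set of 14 distinct strings)
def pvVALID_TLDS : List String :=
  PySem.Set.ofList [".com", ".net", ".org", ".edu", ".gov", ".co", ".io", ".dev",
                    ".info", ".biz", ".mx", ".es", ".app", ".xyz"]

-- the for-loop of A: first tld that is a suffix with something preceding it → True
def pvLoopA (domain : String) : List String → Bool
  | [] => false
  | t :: ts =>
      if PySem.Str.endswith domain t then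
        if PySem.Str.len domain - PySem.Str.len t > 0 then true else pvLoopA domain ts
      else pvLoopA domain ts

def is_valid_tld (domain : String) : Bool :=
  pvLoopA domain (PySem.List.sorted pvVALID_TLDS (fun t => PySem.Str.len t) true)

-- ===== PORT B =====
def is_valid_tld_alt (domain : String) : Bool :=
  let i := PySem.Str.rfind domain "."
  decide (0 < i) && pvVALID_TLDS.contains (PySem.Str.slice domain (some i) none)

-- ===== PRECONDITION & SPEC =====
def Spec_is_valid_tld (domain : String) (out : Bool) : Prop := out = is_valid_tld_alt domain
instance (domain : String) (out : Bool) : Decidable (Spec_is_valid_tld domain out) := by unfold Spec_is_valid_tld; infer_instance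

-- ===== CLAIM (what is proved, stated in full; the proofs are below) =====
def Claim_equal_is_valid_tld : Prop := ∀ (domain : String), Dom_is_valid_tld domain → Spec_is_valid_tld domain (is_valid_tld domain)

-- ===== LEMMAS AND PROOFS =====

-- a singleton pattern is a prefix of (L.drop j) iff L[j]? is that character
theorem pv_dot_prefix_iff (L : List Char) (j : Nat) :
    (['.'].isPrefixOf (L.drop j)) = true ↔ L[j]? = some '.' := by
  rw [← List.head?_drop, List.isPrefixOf_iff_prefix]
  cases h : L.drop j with
  | nil => simp only [List.head?_nil]
           constructor
           · intro hp; exact absurd (List.prefix_nil.mp hp) (by simp)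
           · intro hp; cases hp
  | cons a t => rw [List.cons_prefix_iff]
                simp only [List.head?_cons, List.nil_prefix, and_true, Option.some.injEq]
                constructor
                · rintro ⟨l', hl⟩; exact (List.cons_eq_cons.mp hl).1
                · rintro rfl; exact ⟨t, rfl⟩

-- the A-loop returns true iff some tld in the list is a proper suffix
theorem pv_loop_iff (domain : String) (ts : List String) :
    pvLoopA domain ts = true ↔
      ∃ t ∈ ts, PySem.Str.endswith domain t = true ∧
        PySem.Str.len domain - PySem.Str.len t > 0 := by
  induction ts with
  | nil => simp [pvLoopA]
  | cons t ts ih =>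
    simp only [pvLoopA]
    split_ifs with h1 h2
    · simp only [List.mem_cons]
      exact iff_of_true (by trivial) ⟨t, Or.inl rfl, h1, h2⟩
    · simp only [ih, List.mem_cons]
      constructor
      · rintro ⟨u, hu, h⟩; exact ⟨u, Or.inr hu, h⟩
      · rintro ⟨u, hu | hu, h⟩
        · subst hu; exact absurd h.2 h2
        · exact ⟨u, hu, h⟩
    · simp only [ih, List.mem_cons]
      constructor
      · rintro ⟨u, hu, h⟩; exact ⟨u, Or.inr hu, h⟩
      · rintro ⟨u, hu | hu, h⟩
        · subst hu; exact absurd h.1 h1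
        · exact ⟨u, hu, h⟩

-- unfolding equations of PySem.Chars.rfind.go
theorem pv_go_zero (s sub : List Char) :
    PySem.Chars.rfind.go s sub 0 = if sub.isPrefixOf s then 0 else -1 := by
  rw [PySem.Chars.rfind.go]

theorem pv_go_succ (s sub : List Char) (j : Nat) :
    PySem.Chars.rfind.go s sub (j+1) =
      if sub.isPrefixOf (s.drop (j+1)) then ((j:Int)+1) else PySem.Chars.rfind.go s sub j := by
  rw [PySem.Chars.rfind.go]; push_cast; ring_nf

-- rfind.go on pre ++ '.'::w with no dot in w returns pre.length, for any cursor ≥ pre.length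
theorem pv_go_at (pre w : List Char) (hw : ∀ c ∈ w, c ≠ '.') :
    ∀ k, pre.length ≤ k →
      PySem.Chars.rfind.go (pre ++ '.' :: w) ['.'] k = (pre.length : Int) := by
  intro k
  induction k with
  | zero =>
    intro hk
    have hpre : pre = [] := List.eq_nil_of_length_eq_zero (Nat.le_zero.mp hk)
    subst hpre
    rw [pv_go_zero]
    have : (['.'].isPrefixOf ((([] : List Char) ++ '.' :: w).drop 0)) = true := by
      rw [pv_dot_prefix_iff]; rfl
    simp only [List.drop_zero] at this
    rw [this]
    simp
  | succ j ih =>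
    intro hk
    rw [pv_go_succ]
    rcases Nat.lt_or_ge j pre.length with hj | hj
    · -- pre.length = j+1 : the dot sits exactly at j+1
      have hlen : pre.length = j + 1 := by omega
      have hdot : (pre ++ '.' :: w)[j+1]? = some '.' := by
        rw [← hlen]
        rw [List.getElem?_append_right (Nat.le_refl _)]
        simp
      rw [(pv_dot_prefix_iff _ _).mpr hdot]
      simp [hlen]
    · -- j+1 > pre.length : no dot at j+1
      have hnd : ¬ ((pre ++ '.' :: w)[j+1]? = some '.') := by
        rw [List.getElem?_append_right (by omega : pre.length ≤ j + 1)]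
        have hidx : j + 1 - pre.length = (j - pre.length) + 1 := by omega
        rw [hidx]
        simp only [List.getElem?_cons_succ]
        cases hg : w[j - pre.length]? with
        | none => simp
        | some c =>
          have hc : c ∈ w := List.mem_of_getElem? hg
          simp [hw c hc]
      have : (['.'].isPrefixOf ((pre ++ '.' :: w).drop (j+1))) = false := by
        rw [Bool.eq_false_iff]
        intro hcontra
        exact hnd ((pv_dot_prefix_iff _ _).mp hcontra)
      rw [this]
      simp [ih hj]

-- rfind.go either returns -1 or a valid dot position ≤ the cursor
theorem pv_go_cases (L : List Char) :
    ∀ k, PySem.Chars.rfind.go L ['.'] k = -1 ∨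
      ∃ j : Nat, j ≤ k ∧ PySem.Chars.rfind.go L ['.'] k = (j : Int) ∧ L[j]? = some '.' := by
  intro k
  induction k with
  | zero =>
    rw [pv_go_zero]
    by_cases h : (['.'].isPrefixOf L) = true
    · right
      refine ⟨0, Nat.le_refl 0, by simp [h], ?_⟩
      have := (pv_dot_prefix_iff L 0).mp (by simpa using h)
      simpa using this
    · left; simp [h]
  | succ j ih =>
    rw [pv_go_succ]
    by_cases h : (['.'].isPrefixOf (L.drop (j+1))) = true
    · right
      exact ⟨j + 1, Nat.le_refl _, by simp [h], (pv_dot_prefix_iff L (j+1)).mp h⟩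
    · rcases ih with h1 | ⟨m, hm, he, hd⟩
      · left; simp [h, h1]
      · right; exact ⟨m, Nat.le_succ_of_le hm, by simp [h, he], hd⟩

-- every TLD in the table is a dot followed by dot-free characters
theorem pv_tld_shape : ∀ t ∈ pvVALID_TLDS,
    t.toList.head? = some '.' ∧ ∀ c ∈ t.toList.tail, c ≠ '.' := by
  have hall : (pvVALID_TLDS.all
      (fun t => (t.toList.head? == some '.') && t.toList.tail.all (fun c => c != '.'))) = true := by
    decide
  intro t ht
  have h := List.all_eq_true.mp hall t ht
  simp only [Bool.and_eq_true, beq_iff_eq] at h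
  exact ⟨h.1, fun c hc => by simpa using List.all_eq_true.mp h.2 c hc⟩

theorem pv_main (domain : String) : is_valid_tld domain = is_valid_tld_alt domain := by
  rw [Bool.eq_iff_iff]
  unfold is_valid_tld is_valid_tld_alt
  rw [pv_loop_iff]
  simp only [PySem.List.mem_sorted, Bool.and_eq_true, decide_eq_true_eq]
  set L := domain.toList with hL
  have hrf : PySem.Str.rfind domain "." = PySem.Chars.rfind L ['.'] := by
    rw [PySem.Str.rfind_eq]
    rfl
  have hrg : PySem.Chars.rfind L ['.'] = PySem.Chars.rfind.go L ['.'] L.length := rfl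
  constructor
  · rintro ⟨t, ht, hend, hlen⟩
    obtain ⟨hhd, htl⟩ := pv_tld_shape t ht
    -- t.toList = '.' :: w with no dot in w
    cases htL : t.toList with
    | nil => rw [htL] at hhd; cases hhd
    | cons c w =>
      rw [htL] at hhd htl
      simp only [List.head?_cons, Option.some.injEq] at hhd
      subst hhd
      simp only [List.tail_cons] at htl
      -- suffix decomposition
      rw [PySem.Str.endswith_eq] at hend
      have hsuf : t.toList <:+ L := List.isSuffixOf_iff_suffix.mp hend
      obtain ⟨pre, hpre⟩ := hsuf
      rw [htL] at hpre
      -- lengths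
      rw [PySem.Str.len_eq, PySem.Str.len_eq] at hlen
      have hLlen : L.length = pre.length + (w.length + 1) := by
        rw [← hpre]; simp
      have hplen : 0 < pre.length := by
        rw [htL] at hlen
        simp only [List.length_cons, ← hL] at hlen
        omega
      -- the last dot of L is exactly at pre.length
      have hi : PySem.Str.rfind domain "." = (pre.length : Int) := by
        rw [hrf, hrg, ← hpre]
        exact pv_go_at pre w htl (pre ++ '.' :: w).length (by simp)
      refine ⟨by rw [hi]; exact_mod_cast hplen, ?_⟩
      have hslice : PySem.Str.slice domain (some (PySem.Str.rfind domain ".")) none = t := by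
        rw [hi]
        show String.ofList (PySem.List.slice L (some (pre.length : Int)) none) = t
        rw [PySem.List.slice_from_natCast, ← hpre, List.drop_left, ← htL]
        exact String.ofList_toList
      rw [hslice]
      exact (List.contains_iff_mem).mpr ht
  · rintro ⟨hi, hc⟩
    rw [hrf, hrg] at hi hc
    rcases pv_go_cases L L.length with hneg | ⟨j, _, he, hd⟩
    · rw [hneg] at hi; omega
    · rw [he] at hi hc
      have hj0 : 0 < j := by exact_mod_cast hi
      have hjlt : j < L.length := (List.getElem?_eq_some_iff.mp hd).1
      have hslice : PySem.Str.slice domain (some ((j : Nat) : Int)) none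
          = String.ofList (L.drop j) := by
        show String.ofList (PySem.List.slice L (some ((j : Nat) : Int)) none) = _
        rw [PySem.List.slice_from_natCast]
      rw [hslice] at hc
      refine ⟨String.ofList (L.drop j), (List.contains_iff_mem).mp hc, ?_, ?_⟩
      · rw [PySem.Str.endswith_eq]
        show (String.ofList (L.drop j)).toList.isSuffixOf L = true
        rw [String.toList_ofList]
        exact List.isSuffixOf_iff_suffix.mpr (List.drop_suffix j L)
      · rw [PySem.Str.len_eq, PySem.Str.len_eq, String.toList_ofList, List.length_drop, ← hL]
        omega

-- ===== VERDICT (by name: the statement is the Claim_ definition above) =====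
theorem is_valid_tld_spec : Claim_equal_is_valid_tld := by
  intro domain _
  unfold Spec_is_valid_tld
  exact pv_main domain
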